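-- pv_equiv track=rewrite | github.com/kishan-98/Mini-SQL-Engine | miniSQL.py | check_ordering_ignoring
-- ===== SOURCE A (Python) =====
-- def check_ordering_ignoring(tokens, ignore_value):
--     '''
--     checks
--     '''
--     curr = tokens[0]
--     for i in range(1, len(tokens)):
--         if tokens[i] != ignore_value:
--             if tokens[i] <= curr:
--                 return False
--             else:
--                 curr = tokens[i]
--     return True
-- ===== SOURCE B (Python) =====
-- def check_ordering_ignoring(tokens, ignore_value):
--     seq = [tokens[0]] + [t for t in tokens[1:] if t != ignore_value]
--     return sorted(set(seq)) == seq
-- ===== Notes on version B (the rewrite author's own statement) =====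
-- stated objective: alternative
-- what changed: B materializes the sequence to check (first token kept unconditionally, later tokens equal to ignore_value dropped) and decides strict increase by comparing it with its canonical form sorted(set(seq)), instead of A's index loop carrying a mutable curr with an early return; no element-to-element comparison is written at all.
import Mathlib
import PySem

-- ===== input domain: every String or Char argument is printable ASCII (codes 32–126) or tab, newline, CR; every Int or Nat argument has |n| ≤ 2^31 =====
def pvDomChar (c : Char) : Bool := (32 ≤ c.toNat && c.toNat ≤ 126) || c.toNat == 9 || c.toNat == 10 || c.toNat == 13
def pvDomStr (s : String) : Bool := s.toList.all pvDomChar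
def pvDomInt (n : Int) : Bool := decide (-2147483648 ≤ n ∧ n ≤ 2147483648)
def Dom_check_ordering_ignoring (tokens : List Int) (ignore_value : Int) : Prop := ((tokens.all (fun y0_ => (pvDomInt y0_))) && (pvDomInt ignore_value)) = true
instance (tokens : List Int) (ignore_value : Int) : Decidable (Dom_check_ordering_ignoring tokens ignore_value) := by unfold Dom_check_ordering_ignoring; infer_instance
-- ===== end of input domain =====

-- B decides strict increase (ignoring ignore_value after the first token) by comparing the
-- sequence with its canonical form sorted(set(seq)), instead of A's index loop carrying a
-- mutable 'curr' with an early return; objective: alternative algorithm.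
-- Pre_ excludes only the empty list, on which A raises IndexError (tokens[0]).


-- ===== PORT A =====
-- the for-loop over range(1, len(tokens)) with mutable curr and early 'return False'
def coiLoopA (ignore_value : Int) (curr : Int) (rest : List Int) : Bool :=
  match rest with
  | [] => true
  | t :: ts =>
      if t ≠ ignore_value then
        if t ≤ curr then false else coiLoopA ignore_value t ts
      else coiLoopA ignore_value curr ts

def check_ordering_ignoring (tokens : List Int) (ignore_value : Int) : Bool :=
  match tokens with
  | [] => false        -- tokens[0] raises IndexError in Python; excluded by Pre_
  | t0 :: rest => coiLoopA ignore_value t0 rest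

-- ===== PORT B =====
-- seq = [tokens[0]] + [t for t in tokens[1:] if t != ignore_value]; sorted(set(seq)) == seq
def check_ordering_ignoring_alt (tokens : List Int) (ignore_value : Int) : Bool :=
  match tokens with
  | [] => false        -- tokens[0] raises IndexError in Python; excluded by Pre_
  | t0 :: rest =>
      let seq := t0 :: rest.filter (fun t => t ≠ ignore_value)
      decide (PySem.List.sorted (PySem.Set.ofList seq) (fun x => x) false = seq)

-- ===== PRECONDITION & SPEC =====
-- Pre_ excludes only the empty list, on which both Pythons raise IndexError at tokens[0].
def Pre_check_ordering_ignoring (tokens : List Int) (ignore_value : Int) : Prop := tokens ≠ []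
instance (tokens : List Int) (ignore_value : Int) : Decidable (Pre_check_ordering_ignoring tokens ignore_value) := by unfold Pre_check_ordering_ignoring; infer_instance
def pvWitness_check_ordering_ignoring : List Int × Int := ([3, 1, 5, 1, 7], 1)

def Spec_check_ordering_ignoring (tokens : List Int) (ignore_value : Int) (out : Bool) : Prop := out = check_ordering_ignoring_alt tokens ignore_value
instance (tokens : List Int) (ignore_value : Int) (out : Bool) : Decidable (Spec_check_ordering_ignoring tokens ignore_value out) := by unfold Spec_check_ordering_ignoring; infer_instance

-- ===== CLAIM (what is proved, stated in full; the proofs are below) =====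
def Claim_equal_check_ordering_ignoring : Prop := ∀ (tokens : List Int) (ignore_value : Int), Dom_check_ordering_ignoring tokens ignore_value → Pre_check_ordering_ignoring tokens ignore_value → Spec_check_ordering_ignoring tokens ignore_value (check_ordering_ignoring tokens ignore_value)

-- ===== LEMMAS AND PROOFS =====
-- strict pairwise order decomposes on two cons cells (transitivity of <)
theorem pairwise_lt_cons_cons (a b : Int) (l : List Int) :
    (a :: b :: l).Pairwise (· < ·) ↔ a < b ∧ (b :: l).Pairwise (· < ·) := by
  constructor
  · intro h
    rcases List.pairwise_cons.mp h with ⟨ha, hb⟩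
    exact ⟨ha b (by simp), hb⟩
  · rintro ⟨hab, hbl⟩
    refine List.pairwise_cons.mpr ⟨fun x hx => ?_, hbl⟩
    rcases List.mem_cons.mp hx with rfl | hx
    · exact hab
    · exact lt_trans hab ((List.pairwise_cons.mp hbl).1 x hx)

-- A's loop decides strict pairwise increase of the filtered sequence
theorem coiLoopA_iff (ignore_value : Int) (rest : List Int) :
    ∀ curr, coiLoopA ignore_value curr rest = true
      ↔ (curr :: rest.filter (fun t => t ≠ ignore_value)).Pairwise (· < ·) := by
  induction rest with
  | nil => intro curr; simp [coiLoopA]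
  | cons t ts ih =>
      intro curr
      by_cases h : t = ignore_value
      · simpa [coiLoopA, h, List.filter_cons] using ih curr
      · have hf : List.filter (fun x => decide (x ≠ ignore_value)) (t :: ts)
            = t :: List.filter (fun x => decide (x ≠ ignore_value)) ts := by
          simp [h]
        by_cases hle : t ≤ curr
        · have hstep : coiLoopA ignore_value curr (t :: ts) = false := by
            simp [coiLoopA, h, hle]
          rw [hstep, hf, pairwise_lt_cons_cons]
          constructor
          · intro hc; cases hc
          · rintro ⟨h1, -⟩; omega
        · have hstep : coiLoopA ignore_value curr (t :: ts) = coiLoopA ignore_value t ts := by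
            simp [coiLoopA, h, hle]
          rw [hstep, ih t, hf, pairwise_lt_cons_cons]
          constructor
          · intro hp; exact ⟨by omega, hp⟩
          · rintro ⟨-, hp⟩; exact hp

-- set(l) (first occurrences, in order) of a duplicate-free list is l itself
theorem foldl_add_nodup (l : List Int) :
    ∀ acc : List Int, l.Nodup → (∀ x ∈ l, x ∉ acc) →
      List.foldl PySem.Set.add acc l = acc ++ l := by
  induction l with
  | nil => intro acc _ _; simp
  | cons a t ih =>
      intro acc hnd hdis
      have ha : ¬ acc.contains a := by
        simp only [List.contains_iff_mem]
        exact hdis a (by simp)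
      have : PySem.Set.add acc a = acc ++ [a] := by
        simp [PySem.Set.add, PySem.Set.contains] at *
        simp_all
      rw [List.foldl_cons, this,
          ih (acc ++ [a]) (List.nodup_cons.mp hnd).2 ?_]
      · simp
      · intro x hx
        simp only [List.mem_append, List.mem_singleton]
        rintro (hxa | rfl)
        · exact hdis x (by simp [hx]) hxa
        · exact (List.nodup_cons.mp hnd).1 hx

theorem ofList_eq_self_of_nodup (l : List Int) (h : l.Nodup) :
    PySem.Set.ofList l = l := by
  have := foldl_add_nodup l [] h (by simp)
  simpa [PySem.Set.ofList, PySem.Set.empty] using this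

-- the canonical-form test sorted(set(l)) == l is exactly strict pairwise increase
theorem sorted_ofList_eq_iff (l : List Int) :
    (PySem.List.sorted (PySem.Set.ofList l) (fun x => x) false = l)
      ↔ l.Pairwise (· < ·) := by
  constructor
  · intro h
    have hp := PySem.List.sorted_ofList_pairwise_lt (xs := l)
    rwa [h] at hp
  · intro hp
    have hnd : l.Nodup := hp.imp (fun hab => ne_of_lt hab)
    rw [ofList_eq_self_of_nodup l hnd]
    exact PySem.List.sorted_eq_of_perm_of_pairwise_lt l l (fun x => x) (List.Perm.refl l) hp

-- ===== VERDICT (by name: the statement is the Claim_ definition above) =====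
theorem check_ordering_ignoring_spec : Claim_equal_check_ordering_ignoring := by
  intro tokens ignore_value _ hpre
  unfold Spec_check_ordering_ignoring
  match tokens with
  | [] => exact absurd rfl hpre
  | t0 :: rest =>
      simp only [check_ordering_ignoring, check_ordering_ignoring_alt]
      rw [Bool.eq_iff_iff, coiLoopA_iff, decide_eq_true_iff, sorted_ofList_eq_iff]
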